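-- pv_equiv track=rewrite | github.com/hadicangkring/belajar | app.py | build_markov2_counts
-- ===== SOURCE A (Python) =====
-- from collections import defaultdict, Counter
--
-- def build_markov2_counts(series6):
--     """series6: list of 6-digit strings"""
--     counts = defaultdict(Counter)
--     for s in series6:
--         if not isinstance(s,str) or len(s) < 3:
--             continue
--         s6 = str(s).zfill(6)
--         digits = list(s6)
--         for i in range(len(digits)-2):
--             a,b,c = digits[i], digits[i+1], digits[i+2]
--             counts[(a,b)][c] += 1
--     return counts
-- ===== SOURCE B (Python) =====
-- def build_markov2_counts(series6):
--     """series6: list of 6-digit strings"""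
--     # materialise the trigram stream once
--     stream = []
--     for s in series6:
--         if not isinstance(s, str) or len(s) < 3:
--             continue
--         digits = list(str(s).zfill(6))
--         for i in range(len(digits) - 2):
--             stream.append((digits[i], digits[i + 1], digits[i + 2]))
--     # distinct bigram prefixes in first-occurrence order
--     keys = []
--     for (a, b, _c) in stream:
--         if (a, b) not in keys:
--             keys.append((a, b))
--     # answer each (bigram, next-digit) frequency by a count query over the stream
--     result = {}
--     for (a, b) in keys:
--         nexts = []
--         for t in stream:
--             if t[0] == a and t[1] == b and t[2] not in nexts:
--                 nexts.append(t[2])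
--         result[(a, b)] = {c: stream.count((a, b, c)) for c in nexts}
--     return result
-- ===== Notes on version B (the rewrite author's own statement) =====
-- stated objective: alternative
-- what changed: B never keeps incremental counters: it materialises the trigram stream as a list, deduplicates the bigram prefixes (and per prefix the next digits) in first-occurrence order, and answers each frequency with a stream.count query, so the nested counts[(a,b)][c] += 1 updates of A disappear entirely.
import Mathlib
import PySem

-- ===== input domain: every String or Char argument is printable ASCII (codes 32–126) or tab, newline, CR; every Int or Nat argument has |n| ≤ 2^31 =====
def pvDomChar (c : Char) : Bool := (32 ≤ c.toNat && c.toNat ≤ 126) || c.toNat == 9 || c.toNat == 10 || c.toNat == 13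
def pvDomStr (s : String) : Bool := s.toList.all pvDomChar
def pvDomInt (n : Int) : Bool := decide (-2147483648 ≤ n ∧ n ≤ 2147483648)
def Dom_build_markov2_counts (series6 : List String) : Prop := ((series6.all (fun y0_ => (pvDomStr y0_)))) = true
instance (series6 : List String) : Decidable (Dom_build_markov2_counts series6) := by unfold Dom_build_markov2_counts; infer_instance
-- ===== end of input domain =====

-- B replaces A's incremental nested counters by a materialised trigram stream, first-occurrence dedup of the keys, and count queries over the stream (alternative algorithm; not faster).

-- ===== PORT A =====
def build_markov2_counts (series6 : List String) : List (String × String × List (String × Int)) :=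
  let counts := series6.foldl (fun counts s =>
    if PySem.Str.len s < 3 then counts
    else
      let s6 := PySem.Str.zfill s 6
      let digits := s6.toList.map (fun ch => String.ofList [ch])
      (PySem.List.pyRange 0 ((digits.length : Int) - 2)).foldl (fun counts i =>
        let a := PySem.List.pyGetD digits i ""
        let b := PySem.List.pyGetD digits (i + 1) ""
        let c := PySem.List.pyGetD digits (i + 2) ""
        counts.modify (a, b) PySem.Dict.empty (fun cnt => cnt.modify c 0 (· + 1))) counts)
    PySem.Dict.empty
  counts.items.map (fun q => (q.1.1, q.1.2, q.2.items))

-- ===== PORT B =====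
def build_markov2_counts_alt (series6 : List String) : List (String × String × List (String × Int)) :=
  let stream := series6.foldl (fun st s =>
    if PySem.Str.len s < 3 then st
    else
      let digits := (PySem.Str.zfill s 6).toList.map (fun ch => String.ofList [ch])
      st ++ (PySem.List.pyRange 0 ((digits.length : Int) - 2)).map (fun i =>
        (PySem.List.pyGetD digits i "", PySem.List.pyGetD digits (i + 1) "",
         PySem.List.pyGetD digits (i + 2) ""))) []
  let keys := stream.foldl (fun ks t => if (t.1, t.2.1) ∈ ks then ks else ks ++ [(t.1, t.2.1)]) []
  keys.foldl (fun res ab =>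
    let nexts := stream.foldl (fun cs t =>
      if t.1 = ab.1 ∧ t.2.1 = ab.2 ∧ t.2.2 ∉ cs then cs ++ [t.2.2] else cs) []
    res ++ [(ab.1, ab.2, nexts.map (fun c => (c, (PySem.List.count stream (ab.1, ab.2, c) : Int))))]) []

-- ===== PRECONDITION & SPEC =====
def Spec_build_markov2_counts (series6 : List String) (out : List (String × String × List (String × Int))) : Prop := out = build_markov2_counts_alt series6
instance (series6 : List String) (out : List (String × String × List (String × Int))) : Decidable (Spec_build_markov2_counts series6 out) := by unfold Spec_build_markov2_counts; infer_instance

-- ===== CLAIM (what is proved, stated in full; the proofs are below) =====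
def Claim_equal_build_markov2_counts : Prop := ∀ (series6 : List String), Dom_build_markov2_counts series6 → Spec_build_markov2_counts series6 (build_markov2_counts series6)

-- ===== LEMMAS AND PROOFS =====

-- the nested-dict accumulator step of A (add n at trigram t) and the trigram stream of the input
def pvStep (n : Int) (d : PySem.Dict (String × String) (PySem.Dict String Int))
    (t : String × String × String) : PySem.Dict (String × String) (PySem.Dict String Int) :=
  d.modify (t.1, t.2.1) PySem.Dict.empty (fun cnt => cnt.modify t.2.2 0 (· + n))

def pvDigits (s : String) : List String := (PySem.Str.zfill s 6).toList.map (fun ch => String.ofList [ch])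

def pvTriOf (digits : List String) (i : Nat) : String × String × String :=
  (digits.getD i "", digits.getD (i + 1) "", digits.getD (i + 2) "")

def pvTrigs (s : String) : List (String × String × String) :=
  if PySem.Str.len s < 3 then []
  else (List.range ((pvDigits s).length - 2)).map (pvTriOf (pvDigits s))

def pvT (series6 : List String) : List (String × String × String) := series6.flatMap pvTrigs

-- B's folds as named functions (definitionally the port's lambdas)
def pvKStep (ks : List (String × String)) (t : String × String × String) : List (String × String) :=
  if (t.1, t.2.1) ∈ ks then ks else ks ++ [(t.1, t.2.1)]

def pvKeysF (L : List (String × String × String)) : List (String × String) := L.foldl pvKStep []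

def pvNStep (ab : String × String) (cs : List String) (t : String × String × String) : List String :=
  if t.1 = ab.1 ∧ t.2.1 = ab.2 ∧ t.2.2 ∉ cs then cs ++ [t.2.2] else cs

def pvNexts (L : List (String × String × String)) (ab : String × String) : List String :=
  L.foldl (pvNStep ab) []

def pvF (L : List (String × String × String)) (ab : String × String) : List (String × Int) :=
  (pvNexts L ab).map (fun c => (c, (L.count (ab.1, ab.2, c) : Int)))

def pvStreamStep (st : List (String × String × String)) (s : String) : List (String × String × String) :=
  if PySem.Str.len s < 3 then st
  else st ++ (PySem.List.pyRange 0 (((pvDigits s).length : Int) - 2)).map (fun i =>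
    (PySem.List.pyGetD (pvDigits s) i "", PySem.List.pyGetD (pvDigits s) (i + 1) "",
     PySem.List.pyGetD (pvDigits s) (i + 2) ""))

def pvTable (stream : List (String × String × String)) : List (String × String × List (String × Int)) :=
  (stream.foldl (fun ks t => if (t.1, t.2.1) ∈ ks then ks else ks ++ [(t.1, t.2.1)]) []).foldl
    (fun res ab =>
      let nexts := stream.foldl (fun cs t =>
        if t.1 = ab.1 ∧ t.2.1 = ab.2 ∧ t.2.2 ∉ cs then cs ++ [t.2.2] else cs) []
      res ++ [(ab.1, ab.2, nexts.map (fun c => (c, (PySem.List.count stream (ab.1, ab.2, c) : Int))))]) []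

theorem pv_mem_keysF_aux (L : List (String × String × String)) :
    ∀ (ks : List (String × String)) (ab : String × String),
      ab ∈ L.foldl pvKStep ks ↔ ab ∈ ks ∨ ∃ t ∈ L, ab = (t.1, t.2.1) := by
  have hstep : ∀ (ks : List (String × String)) (t : String × String × String),
      pvKStep ks t = if (t.1, t.2.1) ∈ ks then ks else ks ++ [(t.1, t.2.1)] := fun _ _ => rfl
  induction L with
  | nil => intro ks ab; simp
  | cons t L ih =>
    intro ks ab
    rw [List.foldl_cons, hstep]
    by_cases h : (t.1, t.2.1) ∈ ks
    · rw [if_pos h, ih]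
      constructor
      · rintro (hk | ⟨u, hu, rfl⟩)
        · exact Or.inl hk
        · exact Or.inr ⟨u, List.mem_cons_of_mem _ hu, rfl⟩
      · rintro (hk | ⟨u, hu, rfl⟩)
        · exact Or.inl hk
        · rcases List.mem_cons.mp hu with rfl | hu'
          · exact Or.inl h
          · exact Or.inr ⟨u, hu', rfl⟩
    · rw [if_neg h, ih]
      constructor
      · rintro (hk | ⟨u, hu, rfl⟩)
        · rcases List.mem_append.mp hk with hk' | hk'
          · exact Or.inl hk'
          · exact Or.inr ⟨t, List.mem_cons_self .., by simpa using hk'⟩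
        · exact Or.inr ⟨u, List.mem_cons_of_mem _ hu, rfl⟩
      · rintro (hk | ⟨u, hu, rfl⟩)
        · exact Or.inl (List.mem_append.mpr (Or.inl hk))
        · rcases List.mem_cons.mp hu with rfl | hu'
          · exact Or.inl (List.mem_append.mpr (Or.inr (by simp)))
          · exact Or.inr ⟨u, hu', rfl⟩

theorem pv_mem_keysF (L : List (String × String × String)) (ab : String × String) :
    ab ∈ pvKeysF L ↔ ∃ t ∈ L, ab = (t.1, t.2.1) := by
  rw [pvKeysF, pv_mem_keysF_aux]; simp

theorem pv_nodup_keysF_aux (L : List (String × String × String)) :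
    ∀ (ks : List (String × String)), ks.Nodup → (L.foldl pvKStep ks).Nodup := by
  have hstep : ∀ (ks : List (String × String)) (t : String × String × String),
      pvKStep ks t = if (t.1, t.2.1) ∈ ks then ks else ks ++ [(t.1, t.2.1)] := fun _ _ => rfl
  induction L with
  | nil => intro ks h; simpa using h
  | cons t L ih =>
    intro ks h
    rw [List.foldl_cons, hstep]
    by_cases hm : (t.1, t.2.1) ∈ ks
    · rw [if_pos hm]; exact ih ks h
    · rw [if_neg hm]
      refine ih _ ?_
      rw [List.nodup_append]
      refine ⟨h, List.nodup_singleton _, ?_⟩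
      intro x hx y hy
      rw [List.mem_singleton] at hy
      subst hy
      intro he
      exact hm (he ▸ hx)

theorem pv_mem_nexts_aux (ab : String × String) (L : List (String × String × String)) :
    ∀ (cs : List String) (c : String),
      c ∈ L.foldl (pvNStep ab) cs ↔ c ∈ cs ∨ (ab.1, ab.2, c) ∈ L := by
  obtain ⟨a, b⟩ := ab
  dsimp only
  have hstep : ∀ (cs : List String) (t : String × String × String),
      pvNStep (a, b) cs t = if t.1 = a ∧ t.2.1 = b ∧ t.2.2 ∉ cs then cs ++ [t.2.2] else cs :=
    fun _ _ => rfl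
  induction L with
  | nil => intro cs c; simp
  | cons t L ih =>
    intro cs c
    obtain ⟨t1, t2, t3⟩ := t
    rw [List.foldl_cons, hstep]
    dsimp only
    by_cases h1 : t1 = a ∧ t2 = b ∧ t3 ∉ cs
    · rw [if_pos h1, ih]
      obtain ⟨rfl, rfl, h3⟩ := h1
      simp only [List.mem_append, List.mem_cons, Prod.mk.injEq]
      tauto
    · rw [if_neg h1, ih]
      push_neg at h1
      simp only [List.mem_cons, Prod.mk.injEq]
      constructor
      · tauto
      · rintro (hc | ⟨ha, hb, hcc⟩ | hL)
        · exact Or.inl hc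
        · exact Or.inl (by rw [hcc]; exact h1 ha.symm hb.symm)
        · exact Or.inr hL

theorem pv_mem_nexts (ab : String × String) (L : List (String × String × String)) (c : String) :
    c ∈ pvNexts L ab ↔ (ab.1, ab.2, c) ∈ L := by
  rw [pvNexts, pv_mem_nexts_aux]; simp

theorem pv_nodup_nexts_aux (ab : String × String) (L : List (String × String × String)) :
    ∀ (cs : List String), cs.Nodup → (L.foldl (pvNStep ab) cs).Nodup := by
  have hstep : ∀ (cs : List String) (t : String × String × String),
      pvNStep ab cs t = if t.1 = ab.1 ∧ t.2.1 = ab.2 ∧ t.2.2 ∉ cs then cs ++ [t.2.2] else cs :=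
    fun _ _ => rfl
  induction L with
  | nil => intro cs h; simpa using h
  | cons t L ih =>
    intro cs h
    rw [List.foldl_cons, hstep]
    by_cases hm : t.1 = ab.1 ∧ t.2.1 = ab.2 ∧ t.2.2 ∉ cs
    · rw [if_pos hm]
      refine ih _ ?_
      rw [List.nodup_append]
      refine ⟨h, List.nodup_singleton _, ?_⟩
      intro x hx y hy
      rw [List.mem_singleton] at hy
      subst hy
      intro he
      exact hm.2.2 (he ▸ hx)
    · rw [if_neg hm]; exact ih cs h

theorem pvKeysF_append (L : List (String × String × String)) (t : String × String × String) :
    pvKeysF (L ++ [t]) = pvKStep (pvKeysF L) t := by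
  simp [pvKeysF, List.foldl_append]

theorem pvNexts_append (L : List (String × String × String)) (t : String × String × String)
    (ab : String × String) :
    pvNexts (L ++ [t]) ab = pvNStep ab (pvNexts L ab) t := by
  simp [pvNexts, List.foldl_append]

-- pvF is unchanged by appending a trigram with a different bigram prefix
theorem pv_F_append_ne (L : List (String × String × String)) (t : String × String × String)
    (ab : String × String) (hne : ab ≠ (t.1, t.2.1)) : pvF (L ++ [t]) ab = pvF L ab := by
  unfold pvF
  rw [pvNexts_append]
  have hn : pvNStep ab (pvNexts L ab) t = pvNexts L ab := by
    unfold pvNStep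
    rw [if_neg]
    rintro ⟨h1, h2, -⟩
    exact hne (Prod.ext_iff.mpr ⟨h1.symm, h2.symm⟩)
  rw [hn]
  apply List.map_congr_left
  intro c _
  have hz : List.count (ab.1, ab.2, c) [t] = 0 := by
    rw [List.count_eq_zero]
    intro hmem
    rw [List.mem_singleton] at hmem
    have h1 : t.1 = ab.1 := by rw [← hmem]
    have h2 : t.2.1 = ab.2 := by rw [← hmem]
    exact hne (Prod.ext_iff.mpr ⟨h1.symm, h2.symm⟩)
  simp [List.count_append, hz]

-- bumping the inner counter at t.2.2 matches pvF over the extended stream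
theorem pv_inner_update (L : List (String × String × String)) (t : String × String × String)
    (inner : PySem.Dict String Int) (hit : inner.items = pvF L (t.1, t.2.1)) :
    (inner.modify t.2.2 0 (· + 1)).items = pvF (L ++ [t]) (t.1, t.2.1) := by
  obtain ⟨t1, t2, t3⟩ := t
  simp only at hit ⊢
  have hkeys : inner.keys = pvNexts L (t1, t2) := by
    simp only [PySem.Dict.keys, hit, pvF, List.map_map]
    simp [Function.comp_def]
  have hnodup : inner.keys.Nodup := by
    rw [hkeys]; exact pv_nodup_nexts_aux (t1, t2) L [] (by simp)
  have hmod : inner.modify t3 0 (· + 1) = inner.insert t3 (inner.getD t3 0 + 1) := rfl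
  rw [hmod]
  by_cases hm : t3 ∈ pvNexts L (t1, t2)
  · have hmemit : (t3, (L.count (t1, t2, t3) : Int)) ∈ inner.items := by
      rw [hit]; exact List.mem_map.mpr ⟨t3, hm, rfl⟩
    have hgetD : inner.getD t3 0 = (L.count (t1, t2, t3) : Int) :=
      PySem.Dict.getD_of_mem_items inner hmemit hnodup 0
    have hcont : inner.contains t3 = true :=
      (PySem.Dict.contains_iff_mem_keys _ _).mpr (hkeys ▸ hm)
    rw [PySem.Dict.items_insert_of_contains _ _ hcont, hit, hgetD]
    unfold pvF
    rw [pvNexts_append]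
    have hns : pvNStep (t1, t2) (pvNexts L (t1, t2)) (t1, t2, t3) = pvNexts L (t1, t2) := by
      unfold pvNStep; simp [hm]
    rw [hns, List.map_map]
    apply List.map_congr_left
    intro c hc
    by_cases hct : c = t3
    · subst hct
      simp [List.count_append]
    · have hz : List.count (t1, t2, c) [(t1, t2, t3)] = 0 := by
        rw [List.count_eq_zero]
        intro hmem
        rw [List.mem_singleton, Prod.mk.injEq, Prod.mk.injEq] at hmem
        exact hct hmem.2.2
      have hbeq : (c == t3) = false := by simp [hct]
      simp [List.count_append, hz, hct]
  · have ht : (t1, t2, t3) ∉ L := fun h => hm ((pv_mem_nexts (t1, t2) L t3).mpr h)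
    have hcont : inner.contains t3 = false := by
      rw [PySem.Dict.contains_eq_decide_mem_keys, hkeys]
      simp [hm]
    have hgetD : inner.getD t3 0 = 0 := PySem.Dict.getD_of_not_contains inner 0 hcont
    rw [PySem.Dict.items_insert_of_not_contains _ _ hcont, hit, hgetD]
    unfold pvF
    rw [pvNexts_append]
    have hns : pvNStep (t1, t2) (pvNexts L (t1, t2)) (t1, t2, t3) = pvNexts L (t1, t2) ++ [t3] := by
      unfold pvNStep; simp [hm]
    rw [hns, List.map_append]
    congr 1
    · apply List.map_congr_left
      intro c hc
      have hct : c ≠ t3 := fun h => hm (h ▸ hc)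
      have hz : List.count (t1, t2, c) [(t1, t2, t3)] = 0 := by
        rw [List.count_eq_zero]
        intro hmem
        rw [List.mem_singleton, Prod.mk.injEq, Prod.mk.injEq] at hmem
        exact hct hmem.2.2
      simp [List.count_append, hz]
    · have hz : L.count (t1, t2, t3) = 0 := List.count_eq_zero.mpr ht
      simp [List.count_append, hz]

-- MAIN: A's nested fold, viewed through items, is B's keys/nexts/count table
theorem pv_main (L : List (String × String × String)) :
    (L.foldl (pvStep 1) PySem.Dict.empty).items.map (fun q => (q.1, q.2.items))
      = (pvKeysF L).map (fun ab => (ab, pvF L ab)) := by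
  induction L using List.reverseRecOn with
  | nil => rfl
  | append_singleton L t ih =>
    rw [List.foldl_append, List.foldl_cons, List.foldl_nil]
    obtain ⟨t1, t2, t3⟩ := t
    have hkeys : (L.foldl (pvStep 1) PySem.Dict.empty).keys = pvKeysF L := by
      have h := congrArg (List.map Prod.fst) ih
      rw [List.map_map, List.map_map] at h
      simpa [PySem.Dict.keys, Function.comp_def] using h
    have hnodupD : (L.foldl (pvStep 1) PySem.Dict.empty).keys.Nodup := by
      rw [hkeys]; exact pv_nodup_keysF_aux L [] (by simp)
    have hps : pvStep 1 (L.foldl (pvStep 1) PySem.Dict.empty) (t1, t2, t3)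
        = (L.foldl (pvStep 1) PySem.Dict.empty).insert (t1, t2)
            (((L.foldl (pvStep 1) PySem.Dict.empty).getD (t1, t2) PySem.Dict.empty).modify t3 0 (· + 1)) := rfl
    rw [hps, pvKeysF_append]
    have hks : pvKStep (pvKeysF L) (t1, t2, t3)
        = if (t1, t2) ∈ pvKeysF L then pvKeysF L else pvKeysF L ++ [(t1, t2)] := rfl
    rw [hks]
    by_cases hm : (t1, t2) ∈ pvKeysF L
    · have hcont : (L.foldl (pvStep 1) PySem.Dict.empty).contains (t1, t2) = true :=
        (PySem.Dict.contains_iff_mem_keys _ _).mpr (hkeys ▸ hm)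
      have hex : ∃ q ∈ (L.foldl (pvStep 1) PySem.Dict.empty).items,
          q.1 = (t1, t2) ∧ q.2.items = pvF L (t1, t2) := by
        have hmem : ((t1, t2), pvF L (t1, t2)) ∈ (pvKeysF L).map (fun ab => (ab, pvF L ab)) :=
          List.mem_map.mpr ⟨(t1, t2), hm, rfl⟩
        rw [← ih] at hmem
        obtain ⟨q, hq, heq⟩ := List.mem_map.mp hmem
        exact ⟨q, hq, congrArg Prod.fst heq, congrArg Prod.snd heq⟩
      obtain ⟨q, hqmem, hq1, hq2⟩ := hex
      have hgd : (L.foldl (pvStep 1) PySem.Dict.empty).getD (t1, t2) PySem.Dict.empty = q.2 := by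
        refine PySem.Dict.getD_of_mem_items _ ?_ hnodupD _
        rw [← hq1]; simpa using hqmem
      rw [if_pos hm, PySem.Dict.items_insert_of_contains _ _ hcont, List.map_map]
      have hcomp : (L.foldl (pvStep 1) PySem.Dict.empty).items.map
            ((fun q => (q.1, q.2.items)) ∘
              (fun p => if p.1 == (t1, t2) then ((t1, t2), (((L.foldl (pvStep 1) PySem.Dict.empty).getD (t1, t2) PySem.Dict.empty).modify t3 0 (· + 1))) else p))
          = ((L.foldl (pvStep 1) PySem.Dict.empty).items.map (fun q => (q.1, q.2.items))).map
              (fun p => if p.1 = (t1, t2) then ((t1, t2), (((L.foldl (pvStep 1) PySem.Dict.empty).getD (t1, t2) PySem.Dict.empty).modify t3 0 (· + 1)).items) else p) := by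
        rw [List.map_map]
        apply List.map_congr_left
        intro r _
        by_cases h : r.1 = (t1, t2) <;> simp [h]
      rw [hcomp, ih, List.map_map]
      apply List.map_congr_left
      intro ab hab
      show (if ab = (t1, t2)
          then ((t1, t2), (((L.foldl (pvStep 1) PySem.Dict.empty).getD (t1, t2) PySem.Dict.empty).modify t3 0 (· + 1)).items)
          else (ab, pvF L ab))
        = (ab, pvF (L ++ [(t1, t2, t3)]) ab)
      by_cases h : ab = (t1, t2)
      · rw [if_pos h, hgd]
        subst h
        exact congrArg (fun z => ((t1, t2), z)) (pv_inner_update L (t1, t2, t3) q.2 hq2)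
      · rw [if_neg h, pv_F_append_ne L (t1, t2, t3) ab (by simpa using h)]
    · have hcont : (L.foldl (pvStep 1) PySem.Dict.empty).contains (t1, t2) = false := by
        rw [PySem.Dict.contains_eq_decide_mem_keys, hkeys]
        simp [hm]
      have hgd : (L.foldl (pvStep 1) PySem.Dict.empty).getD (t1, t2) PySem.Dict.empty
          = PySem.Dict.empty := PySem.Dict.getD_of_not_contains _ _ hcont
      have hne0 : pvNexts L (t1, t2) = [] := by
        rw [List.eq_nil_iff_forall_not_mem]
        intro c hc
        exact hm ((pv_mem_keysF L (t1, t2)).mpr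
          ⟨(t1, t2, c), (pv_mem_nexts (t1, t2) L c).mp hc, rfl⟩)
      rw [if_neg hm, PySem.Dict.items_insert_of_not_contains _ _ hcont, List.map_append, ih,
        List.map_append]
      congr 1
      · apply List.map_congr_left
        intro ab hab
        have h : ab ≠ (t1, t2) := fun h => hm (h ▸ hab)
        exact congrArg (fun z => (ab, z)) (pv_F_append_ne L (t1, t2, t3) ab (by simpa using h)).symm
      · rw [hgd]
        have hfl : PySem.Dict.empty.items = pvF L (t1, t2) := by
          rw [pvF, hne0]; rfl
        have hiu := pv_inner_update L (t1, t2, t3) PySem.Dict.empty hfl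
        simp only [List.map_cons, List.map_nil]
        rw [hiu]

-- the inner map over pyRange is the trigram list of s
theorem pv_trigs_map (s : String) (h : ¬ PySem.Str.len s < 3) :
    (PySem.List.pyRange 0 (((pvDigits s).length : Int) - 2)).map (fun i =>
        (PySem.List.pyGetD (pvDigits s) i "", PySem.List.pyGetD (pvDigits s) (i + 1) "",
         PySem.List.pyGetD (pvDigits s) (i + 2) ""))
      = pvTrigs s := by
  unfold pvTrigs
  rw [if_neg h]
  have hlen : 3 ≤ (pvDigits s).length := by
    rw [PySem.Str.len_eq] at h
    have : 3 ≤ s.toList.length := by exact_mod_cast not_lt.mp h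
    simp only [pvDigits, List.length_map, PySem.Str.toList_zfill, PySem.Chars.length_zfill]
    omega
  have hcast : ((pvDigits s).length : Int) - 2 = (((pvDigits s).length - 2 : Nat) : Int) := by omega
  rw [hcast, PySem.List.pyRange_zero_natCast, List.map_map]
  apply List.map_congr_left
  intro i _
  simp only [Function.comp_apply]
  rw [show ((i : Int) + 1) = ((i + 1 : Nat) : Int) from by push_cast; ring,
    show ((i : Int) + 2) = ((i + 2 : Nat) : Int) from by push_cast; ring,
    PySem.List.pyGetD_natCast, PySem.List.pyGetD_natCast, PySem.List.pyGetD_natCast]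
  simp only [pvTriOf]

-- A's per-string inner loop, as a fold over that string's trigram list
theorem pv_inner (acc : PySem.Dict (String × String) (PySem.Dict String Int)) (s : String) :
    (if PySem.Str.len s < 3 then acc
     else (PySem.List.pyRange 0 (((pvDigits s).length : Int) - 2)).foldl (fun counts i =>
        counts.modify (PySem.List.pyGetD (pvDigits s) i "", PySem.List.pyGetD (pvDigits s) (i + 1) "")
          PySem.Dict.empty (fun cnt => cnt.modify (PySem.List.pyGetD (pvDigits s) (i + 2) "") 0 (· + 1))) acc)
      = (pvTrigs s).foldl (pvStep 1) acc := by
  unfold pvTrigs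
  by_cases h : PySem.Str.len s < 3
  · rw [if_pos h, if_pos h, List.foldl_nil]
  · rw [if_neg h, if_neg h]
    have hlen : 3 ≤ (pvDigits s).length := by
      rw [PySem.Str.len_eq] at h
      have : 3 ≤ s.toList.length := by exact_mod_cast not_lt.mp h
      simp only [pvDigits, List.length_map, PySem.Str.toList_zfill, PySem.Chars.length_zfill]
      omega
    have hcast : ((pvDigits s).length : Int) - 2 = (((pvDigits s).length - 2 : Nat) : Int) := by omega
    rw [hcast, PySem.List.pyRange_zero_natCast, List.foldl_map, List.foldl_map]
    apply PySem.List.foldl_congr_mem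
    intro acc' i _
    rw [show ((i : Int) + 1) = ((i + 1 : Nat) : Int) from by push_cast; ring,
      show ((i : Int) + 2) = ((i + 2 : Nat) : Int) from by push_cast; ring,
      PySem.List.pyGetD_natCast, PySem.List.pyGetD_natCast, PySem.List.pyGetD_natCast]
    simp only [pvStep, pvTriOf]

theorem pvA_normal (l : List String) :
    build_markov2_counts l
      = ((pvT l).foldl (pvStep 1) PySem.Dict.empty).items.map (fun q => (q.1.1, q.1.2, q.2.items)) := by
  unfold build_markov2_counts
  have h : l.foldl (fun counts s =>
      if PySem.Str.len s < 3 then counts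
      else (PySem.List.pyRange 0 ((((PySem.Str.zfill s 6).toList.map (fun ch => String.ofList [ch])).length : Int) - 2)).foldl (fun counts i =>
        counts.modify (PySem.List.pyGetD ((PySem.Str.zfill s 6).toList.map (fun ch => String.ofList [ch])) i "",
          PySem.List.pyGetD ((PySem.Str.zfill s 6).toList.map (fun ch => String.ofList [ch])) (i + 1) "")
          PySem.Dict.empty (fun cnt => cnt.modify (PySem.List.pyGetD ((PySem.Str.zfill s 6).toList.map (fun ch => String.ofList [ch])) (i + 2) "") 0 (· + 1))) counts)
      PySem.Dict.empty
      = (pvT l).foldl (pvStep 1) PySem.Dict.empty := by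
    rw [pvT, List.foldl_flatMap]
    apply PySem.List.foldl_congr_mem
    intro acc s _
    exact pv_inner acc s
  exact congrArg _ (congrArg _ h)

theorem pvTable_eq (stream : List (String × String × String)) :
    pvTable stream = (pvKeysF stream).map (fun ab => (ab.1, ab.2, pvF stream ab)) := by
  unfold pvTable
  rw [PySem.List.foldl_append_singleton_eq_map]
  rw [List.nil_append]
  apply List.map_congr_left
  intro ab _
  simp only [pvF, pvNexts, PySem.List.count_eq]
  rfl

theorem pvB_normal (l : List String) :
    build_markov2_counts_alt l
      = (pvKeysF (pvT l)).map (fun ab => (ab.1, ab.2, pvF (pvT l) ab)) := by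
  have e : build_markov2_counts_alt l = pvTable (l.foldl pvStreamStep []) := rfl
  rw [e]
  have hstream : l.foldl pvStreamStep [] = pvT l := by
    have h : ∀ (acc : List (String × String × String)) (s : String), s ∈ l →
        pvStreamStep acc s = acc ++ pvTrigs s := by
      intro acc s _
      unfold pvStreamStep
      by_cases hc : PySem.Str.len s < 3
      · rw [if_pos hc]
        unfold pvTrigs
        rw [if_pos hc, List.append_nil]
      · rw [if_neg hc, pv_trigs_map s hc]
    rw [PySem.List.foldl_congr_mem l pvStreamStep (fun acc s => acc ++ pvTrigs s) [] h,
      PySem.List.foldl_append_eq_flatMap, List.nil_append, pvT]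
  rw [hstream, pvTable_eq]

-- ===== VERDICT (by name: the statement is the Claim_ definition above) =====
theorem build_markov2_counts_spec : Claim_equal_build_markov2_counts := by
  intro series6 _
  unfold Spec_build_markov2_counts
  rw [pvA_normal, pvB_normal]
  have h := pv_main (pvT series6)
  calc ((pvT series6).foldl (pvStep 1) PySem.Dict.empty).items.map (fun q => (q.1.1, q.1.2, q.2.items))
      = (((pvT series6).foldl (pvStep 1) PySem.Dict.empty).items.map (fun q => (q.1, q.2.items))).map
          (fun p => (p.1.1, p.1.2, p.2)) := by rw [List.map_map]; rfl
    _ = ((pvKeysF (pvT series6)).map (fun ab => (ab, pvF (pvT series6) ab))).map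
          (fun p => (p.1.1, p.1.2, p.2)) := by rw [h]
    _ = (pvKeysF (pvT series6)).map (fun ab => (ab.1, ab.2, pvF (pvT series6) ab)) := by
          rw [List.map_map]; rfl
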